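-- pv_equiv track=rewrite | github.com/n1cholasdunn/SRK-training | backend/planApi/gsheets/utils/remove_whitespace_training.py | remove_otw_empty_elements
-- ===== SOURCE A (Python) =====
-- def remove_otw_empty_elements(data):
--     # Determine maximum length of rows in the dataset
--     max_length = max(len(row) for row in data)
--
--     # Extend each row to the maximum length with empty strings
--     for row in data:
--         while len(row) < max_length:
--             row.append("")
--
--     # Transpose the data to work with columns
--     transposed_data = list(zip(*data))
--
--     # Identify columns that have at least one non-empty entry
--     valid_columns = [
--         col for col in transposed_data if any(item.strip() for item in col)
--     ]
--
--     # Transpose the filtered columns back to rows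
--     filtered_data = [list(row) for row in zip(*valid_columns)]
--
--     return filtered_data
-- ===== SOURCE B (Python) =====
-- def remove_otw_empty_elements(data):
--     max_length = max(len(row) for row in data)
--
--     # Same in-place padding as the original (mutation is observable)
--     for row in data:
--         while len(row) < max_length:
--             row.append("")
--
--     # Indices of columns with at least one non-blank entry
--     valid_indices = [
--         i for i in range(max_length)
--         if any(row[i].strip() for row in data)
--     ]
--
--     if not valid_indices:
--         return []
--
--     return [[row[i] for i in valid_indices] for row in data]
-- ===== Notes on version B (the rewrite author's own statement) =====
-- stated objective: simpler
-- what changed: B drops both transposes: it collects the valid column indices directly and projects each row onto them, instead of transposing, filtering columns, and transposing back.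
import Mathlib
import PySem

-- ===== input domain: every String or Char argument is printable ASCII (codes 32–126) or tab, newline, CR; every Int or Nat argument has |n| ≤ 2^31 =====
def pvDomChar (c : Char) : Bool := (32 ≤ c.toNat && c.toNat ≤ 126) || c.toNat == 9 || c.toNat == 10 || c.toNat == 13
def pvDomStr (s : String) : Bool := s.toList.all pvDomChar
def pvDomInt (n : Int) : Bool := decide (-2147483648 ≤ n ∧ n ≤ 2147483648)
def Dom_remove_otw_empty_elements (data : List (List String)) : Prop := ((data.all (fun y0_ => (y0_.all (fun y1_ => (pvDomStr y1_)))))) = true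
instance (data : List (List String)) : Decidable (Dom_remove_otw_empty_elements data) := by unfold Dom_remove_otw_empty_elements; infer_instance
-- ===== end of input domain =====

-- B drops both transposes of A: it collects the valid column indices and projects each row
-- onto them (objective: simpler). Equivalence is about the RETURN value; both Pythons
-- perform the same in-place padding of the argument's rows.

-- ===== PORT A =====
-- while len(row) < max_length: row.append("")
def pvPadRow (m : Nat) (r : List String) : List String :=
  if r.length < m then pvPadRow m (r ++ [""]) else r
termination_by m - r.length
decreasing_by simp; omega

-- list(zip(*rows)): tuples up to the shortest row, turned into lists (the "" default is
-- never read: every produced index is below every row's length)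
def pvMinLen (rows : List (List String)) : Nat := ((rows.map List.length).min?).getD 0

def pvZipStar (rows : List (List String)) : List (List String) :=
  if rows.isEmpty then [] else
    (List.range (pvMinLen rows)).map (fun i => rows.map (fun r => r.getD i ""))

def remove_otw_empty_elements (data : List (List String)) : List (List String) :=
  let max_length := ((data.map List.length).max?).getD 0
  let padded := data.map (pvPadRow max_length)
  let transposed := pvZipStar padded
  let valid_columns := transposed.filter (fun col => col.any (fun item => !(PySem.Str.strip item == "")))
  (pvZipStar valid_columns).map (fun row => row)

-- ===== PORT B =====
def remove_otw_empty_elements_alt (data : List (List String)) : List (List String) :=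
  let max_length := ((data.map List.length).max?).getD 0
  let padded := data.map (pvPadRow max_length)
  let valid_indices := (List.range max_length).filter
      (fun i => padded.any (fun row => !(PySem.Str.strip (row.getD i "") == "")))
  if valid_indices.isEmpty then [] else
    padded.map (fun row => valid_indices.map (fun i => row.getD i ""))

-- ===== PRECONDITION & SPEC =====
-- A raises ValueError (max() of an empty generator) on empty data; B raises identically there.
def Pre_remove_otw_empty_elements (data : List (List String)) : Prop := data ≠ []
instance (data : List (List String)) : Decidable (Pre_remove_otw_empty_elements data) := by
  unfold Pre_remove_otw_empty_elements; infer_instance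

def pvWitness_remove_otw_empty_elements : List (List String) := [["a", ""], [" "]]

def Spec_remove_otw_empty_elements (data : List (List String)) (out : List (List String)) : Prop := out = remove_otw_empty_elements_alt data
instance (data : List (List String)) (out : List (List String)) : Decidable (Spec_remove_otw_empty_elements data out) := by unfold Spec_remove_otw_empty_elements; infer_instance

-- ===== CLAIM (what is proved, stated in full; the proofs are below) =====
def Claim_equal_remove_otw_empty_elements : Prop := ∀ (data : List (List String)), Dom_remove_otw_empty_elements data → Pre_remove_otw_empty_elements data → Spec_remove_otw_empty_elements data (remove_otw_empty_elements data)

-- ===== LEMMAS AND PROOFS =====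

theorem pvPadRow_eq (m : Nat) (r : List String) :
    pvPadRow m r = r ++ List.replicate (m - r.length) "" := by
  fun_induction pvPadRow m r with
  | case1 r h ih =>
      rw [ih]; simp
      rw [← List.replicate_succ]; congr 1; omega
  | case2 r h => simp; omega

theorem pvPadRow_length (m : Nat) (r : List String) (h : r.length ≤ m) :
    (pvPadRow m r).length = m := by
  simp [pvPadRow_eq]; omega

theorem min?_replicate (n a : Nat) (h : n ≠ 0) : (List.replicate n a).min? = some a := by
  induction n with
  | zero => omega
  | succ k ih =>
    cases k with
    | zero => simp
    | succ j => rw [List.replicate_succ, List.min?_cons, ih (by omega)]; simp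

theorem main_eq (data : List (List String)) (h : data ≠ []) :
    remove_otw_empty_elements data = remove_otw_empty_elements_alt data := by
  unfold remove_otw_empty_elements remove_otw_empty_elements_alt
  dsimp only
  set m := ((data.map List.length).max?).getD 0 with hm
  set P := data.map (pvPadRow m) with hP
  have hPlen : ∀ p ∈ P, p.length = m := by
    intro p hp
    rw [hP] at hp
    obtain ⟨r, hr, rfl⟩ := List.mem_map.mp hp
    exact pvPadRow_length m r (List.le_max?_getD_of_mem (List.mem_map_of_mem hr))
  have hPne : P ≠ [] := by simp [hP, h]
  have hminP : pvMinLen P = m := by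
    unfold pvMinLen
    rw [List.map_eq_replicate_iff.mpr hPlen, min?_replicate _ _ (by simp [hPne])]
    rfl
  have hzipP : pvZipStar P = (List.range m).map (fun i => P.map (fun r => r.getD i "")) := by
    unfold pvZipStar
    rw [if_neg (by simp [hPne]), hminP]
  rw [hzipP, List.filter_map]
  have hpred : ((fun col => col.any fun item => !(PySem.Str.strip item == "")) ∘
      fun i => P.map fun r => r.getD i "") =
      fun i => P.any fun row => !(PySem.Str.strip (row.getD i "") == "") := by
    funext i; simp [Function.comp, List.any_map]; rfl
  rw [hpred]
  set V := (List.range m).filter (fun i => P.any fun row => !(PySem.Str.strip (row.getD i "") == "")) with hV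
  by_cases hVe : V = []
  · simp [hVe, pvZipStar]
  · rw [if_neg (by simp [hVe])]
    have hcolLen : ∀ c ∈ V.map (fun i => P.map (fun r => r.getD i "")), c.length = P.length := by
      intro c hc; obtain ⟨i, _, rfl⟩ := List.mem_map.mp hc; simp
    have hminV : pvMinLen (V.map (fun i => P.map (fun r => r.getD i ""))) = P.length := by
      unfold pvMinLen
      rw [List.map_eq_replicate_iff.mpr hcolLen, min?_replicate _ _ (by simp [hVe])]
      rfl
    unfold pvZipStar
    rw [if_neg (by simp [hVe]), hminV]
    apply List.ext_getElem
    · simp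
    · intro j h1 h2
      have hj : j < P.length := by simpa using h2
      simp only [List.getElem_map, List.getElem_range, List.map_map, Function.comp]
      apply List.map_congr_left
      intro i hi
      have him : i < m := by
        rw [hV] at hi
        exact List.mem_range.mp (List.mem_filter.mp hi).1
      have hjP : (P[j]'hj).length = m := hPlen _ (List.getElem_mem hj)
      simp [List.getD, List.getElem?_eq_getElem hj,
            List.getElem?_eq_getElem (show i < (P[j]'hj).length by omega)]

-- ===== VERDICT (by name: the statement is the Claim_ definition above) =====
theorem remove_otw_empty_elements_spec : Claim_equal_remove_otw_empty_elements := by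
  intro data _ hpre
  unfold Spec_remove_otw_empty_elements
  exact main_eq data hpre
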